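-- pv_equiv track=rewrite | github.com/Azure-Samples/maf-sk-context-migration | src/agent_conversation/sk.py | _summarise_forward_staffing
-- ===== SOURCE A (Python) =====
-- from typing import Any, Dict, List, cast
--
-- def _summarise_forward_staffing(schedule: Dict[str, Any], horizon: int) -> str:
--     staff_entries = schedule.get("staff_schedule", [])
--     if not staff_entries:
--         return "Staffing schedule is empty; please verify the dataset."
--     horizon_dates: Dict[str, int] = {}
--     for entry in staff_entries:
--         horizon_dates.setdefault(entry.get("date"), 0)
--         horizon_dates[entry.get("date")] += 1
--     sorted_dates = sorted(horizon_dates)[:horizon]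
--     lines: List[str] = [
--         "Constraints: max 10 hours/day, max 8 consecutive hours, max 5 consecutive days",
--         "Upcoming staffing snapshot:",
--     ]
--     for day in sorted_dates:
--         roles = {entry.get("role") for entry in staff_entries if entry.get("date") == day}
--         lines.append(f"- {day}: roles {sorted(roles)}")
--     return "\n".join(lines)
-- ===== SOURCE B (Python) =====
-- def _summarise_forward_staffing(schedule, horizon):
--     staff_entries = schedule.get("staff_schedule", [])
--     if not staff_entries:
--         return "Staffing schedule is empty; please verify the dataset."
--     ordered = sorted(staff_entries, key=lambda e: e.get("date"))
--     groups = []  # consecutive runs of equal dates: (date, set of roles)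
--     for e in ordered:
--         day = e.get("date")
--         if groups and groups[-1][0] == day:
--             groups[-1][1].add(e.get("role"))
--         else:
--             groups.append((day, {e.get("role")}))
--     lines = [
--         "Constraints: max 10 hours/day, max 8 consecutive hours, max 5 consecutive days",
--         "Upcoming staffing snapshot:",
--     ]
--     for day, roles in groups[:horizon]:
--         lines.append(f"- {day}: roles {sorted(roles)}")
--     return "\n".join(lines)
-- ===== Notes on version B (the rewrite author's own statement) =====
-- stated objective: alternative
-- what changed: A builds a date-count dict and then re-scans the whole entry list with a set comprehension for every displayed day; B sorts the entries by date once and walks the sorted list in a single pass, collecting each consecutive run of equal dates into a (date, role-set) group, then slices the group list to the horizon.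
import Mathlib
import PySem

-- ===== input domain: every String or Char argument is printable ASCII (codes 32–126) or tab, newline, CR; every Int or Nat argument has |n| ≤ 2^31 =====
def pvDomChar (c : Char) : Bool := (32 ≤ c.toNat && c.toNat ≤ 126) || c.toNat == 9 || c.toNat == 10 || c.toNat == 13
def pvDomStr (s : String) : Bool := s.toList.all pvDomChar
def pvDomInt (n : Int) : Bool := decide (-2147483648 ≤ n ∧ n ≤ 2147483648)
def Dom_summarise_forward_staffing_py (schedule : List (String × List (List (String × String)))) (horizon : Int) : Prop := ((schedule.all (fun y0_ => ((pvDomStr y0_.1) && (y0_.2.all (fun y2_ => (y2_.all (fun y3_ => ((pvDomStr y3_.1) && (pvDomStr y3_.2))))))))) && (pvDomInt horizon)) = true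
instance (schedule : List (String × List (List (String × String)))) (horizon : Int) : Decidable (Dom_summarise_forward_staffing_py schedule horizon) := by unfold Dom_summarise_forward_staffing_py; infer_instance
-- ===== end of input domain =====

-- B replaces A's count-dict plus one full re-scan of all entries per displayed day by a single
-- sort-then-group pass over the entries (objective: alternative; return values proved equal on Pre_).

-- ===== PORT A =====
-- shared helper: Python's entry.get(k); Pre_ guarantees the key is present, so the "" default is never taken
def pvEntryGet (e : List (String × String)) (k : String) : String :=
  (PySem.Dict.get? (PySem.Dict.mk e) k).getD ""
-- Python repr(s), hand-ported (PySem has no repr); exact for printable ASCII plus tab/newline/CR (= Dom)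
def pvReprChar (q c : Char) : List Char :=
  if c = '\\' then ['\\', '\\']
  else if c = q then ['\\', q]
  else if c = Char.ofNat 9 then ['\\', 't']
  else if c = Char.ofNat 10 then ['\\', 'n']
  else if c = Char.ofNat 13 then ['\\', 'r']
  else [c]
def pvRepr (s : String) : String :=
  let cs := s.toList
  let q : Char := if cs.contains '\'' && !cs.contains '"' then '"' else '\''
  String.ofList (q :: cs.flatMap (pvReprChar q) ++ [q])
-- str(sorted_roles): Python's repr of a list of str
def pvListRepr (xs : List String) : String :=
  "[" ++ PySem.Str.join ", " (xs.map pvRepr) ++ "]"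

-- loop body of A's counting loop: horizon_dates.setdefault(entry.get("date"), 0); horizon_dates[entry.get("date")] += 1
def pvCountStep (d : PySem.Dict String Int) (entry : List (String × String)) : PySem.Dict String Int :=
  (PySem.Dict.setdefault d (pvEntryGet entry "date") 0).modify (pvEntryGet entry "date") 0 (· + 1)
-- body of A's output loop: the set comprehension over ALL entries, then the f-string line
def pvLineA (staff_entries : List (List (String × String))) (day : String) : String :=
  "- " ++ day ++ ": roles " ++
    pvListRepr (PySem.List.sorted
      (PySem.Set.ofList ((staff_entries.filter (fun e => pvEntryGet e "date" == day)).map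
        (fun e => pvEntryGet e "role"))) (fun x => x))

def summarise_forward_staffing_py (schedule : List (String × List (List (String × String)))) (horizon : Int) : String :=
  let staff_entries := PySem.Dict.getD (PySem.Dict.mk schedule) "staff_schedule" []
  if staff_entries = [] then
    "Staffing schedule is empty; please verify the dataset."
  else
    let horizon_dates : PySem.Dict String Int := staff_entries.foldl pvCountStep PySem.Dict.empty
    let sorted_dates := PySem.List.slice (PySem.List.sorted horizon_dates.keys (fun x => x)) none (some horizon)
    let lines : List String :=
      ["Constraints: max 10 hours/day, max 8 consecutive hours, max 5 consecutive days",
       "Upcoming staffing snapshot:"]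
    let lines := sorted_dates.foldl (fun acc day => acc ++ [pvLineA staff_entries day]) lines
    PySem.Str.join "\n" lines

-- ===== PORT B =====
-- loop body of B's grouping loop over the date-sorted entries (B appends at the end and looks at
-- groups[-1]; the fold keeps the groups reversed — cons at the head, look at the head — and the
-- port reverses once at the end)
def pvGroupStep (gs : List (String × PySem.Set String)) (e : List (String × String)) :
    List (String × PySem.Set String) :=
  match gs with
  | (day, roles) :: rest =>
      if day = pvEntryGet e "date" then
        (day, roles.add (pvEntryGet e "role")) :: rest
      else
        (pvEntryGet e "date", PySem.Set.ofList [pvEntryGet e "role"]) :: (day, roles) :: rest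
  | [] => [(pvEntryGet e "date", PySem.Set.ofList [pvEntryGet e "role"])]
-- body of B's output loop over the (already grouped) pairs
def pvLineB (g : String × PySem.Set String) : String :=
  "- " ++ g.1 ++ ": roles " ++ pvListRepr (PySem.List.sorted g.2 (fun x => x))

def summarise_forward_staffing_py_alt (schedule : List (String × List (List (String × String)))) (horizon : Int) : String :=
  let staff_entries := PySem.Dict.getD (PySem.Dict.mk schedule) "staff_schedule" []
  if staff_entries = [] then
    "Staffing schedule is empty; please verify the dataset."
  else
    let ordered := PySem.List.sorted staff_entries (fun e => pvEntryGet e "date")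
    let groups := (ordered.foldl pvGroupStep []).reverse
    let shown := PySem.List.slice groups none (some horizon)
    PySem.Str.join "\n"
      (["Constraints: max 10 hours/day, max 8 consecutive hours, max 5 consecutive days",
        "Upcoming staffing snapshot:"] ++ shown.map pvLineB)

-- ===== PRECONDITION & SPEC =====
-- Pre_ excludes schedules in which some staff entry lacks the "date" or "role" key: entry.get then
-- yields None, which the String-typed ports cannot represent, and A's sorted() raises TypeError as
-- soon as such a None has to be compared with a str.
def Pre_summarise_forward_staffing_py (schedule : List (String × List (List (String × String)))) (horizon : Int) : Prop :=
  ∀ e ∈ PySem.Dict.getD (PySem.Dict.mk schedule) "staff_schedule" ([] : List (List (String × String))),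
    (PySem.Dict.get? (PySem.Dict.mk e) "date").isSome = true ∧
    (PySem.Dict.get? (PySem.Dict.mk e) "role").isSome = true
instance (schedule : List (String × List (List (String × String)))) (horizon : Int) : Decidable (Pre_summarise_forward_staffing_py schedule horizon) := by unfold Pre_summarise_forward_staffing_py; infer_instance

def pvWitness_summarise_forward_staffing_py : (List (String × List (List (String × String)))) × Int :=
  ([("staff_schedule",
     [[("date", "2024-06-02"), ("role", "nurse")],
      [("date", "2024-06-01"), ("role", "doctor")],
      [("date", "2024-06-01"), ("role", "nurse")]])], 2)

def Spec_summarise_forward_staffing_py (schedule : List (String × List (List (String × String)))) (horizon : Int) (out : String) : Prop := out = summarise_forward_staffing_py_alt schedule horizon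
instance (schedule : List (String × List (List (String × String)))) (horizon : Int) (out : String) : Decidable (Spec_summarise_forward_staffing_py schedule horizon out) := by unfold Spec_summarise_forward_staffing_py; infer_instance

-- ===== CLAIM (what is proved, stated in full; the proofs are below) =====
def Claim_equal_summarise_forward_staffing_py : Prop := ∀ (schedule : List (String × List (List (String × String)))) (horizon : Int), Dom_summarise_forward_staffing_py schedule horizon → Pre_summarise_forward_staffing_py schedule horizon → Spec_summarise_forward_staffing_py schedule horizon (summarise_forward_staffing_py schedule horizon)

-- ===== LEMMAS AND PROOFS =====

-- abbreviations for the proofs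
def pvDate (e : List (String × String)) : String := pvEntryGet e "date"
def pvRole (e : List (String × String)) : String := pvEntryGet e "role"
-- the role set A computes for a day (over whichever entry list it is given)
def pvRolesOf (l : List (List (String × String))) (d : String) : PySem.Set String :=
  PySem.Set.ofList ((l.filter (fun e => pvDate e == d)).map pvRole)
-- the grouped view of an entry list: its distinct dates (first occurrence order) with their role sets
def pvG (l : List (List (String × String))) : List (String × PySem.Set String) :=
  (PySem.Set.ofList (l.map pvDate)).map (fun d => (d, pvRolesOf l d))

theorem pvRolesOf_append_ne (l : List (List (String × String))) (e : List (String × String))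
    (d : String) (h : pvDate e ≠ d) : pvRolesOf (l ++ [e]) d = pvRolesOf l d := by
  simp [pvRolesOf, List.filter_append, h]

theorem pvRolesOf_append_self (l : List (List (String × String))) (e : List (String × String)) :
    pvRolesOf (l ++ [e]) (pvDate e) = (pvRolesOf l (pvDate e)).add (pvRole e) := by
  simp [pvRolesOf, List.filter_append, PySem.Set.ofList_append_singleton]

theorem pvRolesOf_of_not_mem (l : List (List (String × String))) (d : String)
    (h : d ∉ l.map pvDate) : pvRolesOf l d = PySem.Set.empty := by
  have : l.filter (fun e => pvDate e == d) = [] := by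
    rw [List.filter_eq_nil_iff]
    intro e he
    simp only [beq_iff_eq]
    intro heq
    exact h (heq ▸ List.mem_map_of_mem he)
  simp [pvRolesOf, this, PySem.Set.ofList]

-- one counting step of A touches exactly its key
theorem pvCountStep_keys (d : PySem.Dict String Int) (e : List (String × String)) :
    (pvCountStep d e).keys = PySem.Set.add d.keys (pvDate e) := by
  unfold pvCountStep
  simp only [pvDate]
  rw [PySem.Dict.keys_modify, PySem.Dict.keys_insert_of_contains, PySem.Dict.keys_setdefault]
  · by_cases hm : pvEntryGet e "date" ∈ d.keys
    · rw [if_pos ((PySem.Dict.contains_iff_mem_keys _ _).mpr hm), PySem.Set.add_of_mem hm]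
    · rw [if_neg (fun hc => hm ((PySem.Dict.contains_iff_mem_keys _ _).mp hc)),
          PySem.Set.add_of_not_mem hm]
  · simp [PySem.Dict.contains_setdefault]

-- A's count dict holds exactly the distinct dates, in first-occurrence order
theorem pvKeysA (l : List (List (String × String))) :
    (l.foldl pvCountStep PySem.Dict.empty).keys = PySem.Set.ofList (l.map pvDate) := by
  have h : ∀ (d : PySem.Dict String Int),
      (l.foldl pvCountStep d).keys = l.foldl (fun s e => PySem.Set.add s (pvDate e)) d.keys := by
    induction l with
    | nil => intro d; rfl
    | cons e t ih => intro d; simp only [List.foldl_cons, ih, pvCountStep_keys]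
  rw [h PySem.Dict.empty]
  rw [← PySem.Set.update_map_eq_foldl_add]
  simp [PySem.Dict.keys_empty, PySem.Set.update_nil_left]

-- the distinct elements of a ≤-sorted list are <-sorted
theorem pvOfList_pairwise_lt (m : List String) (h : m.Pairwise (· ≤ ·)) :
    (PySem.Set.ofList m).Pairwise (· < ·) := by
  induction m using List.reverseRecOn with
  | nil => simp [PySem.Set.ofList]
  | append_singleton m' y ih =>
    rw [List.pairwise_append] at h
    obtain ⟨h1, _, h3⟩ := h
    rw [PySem.Set.ofList_append_singleton]
    by_cases hm : y ∈ PySem.Set.ofList m'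
    · rw [PySem.Set.add_of_mem hm]; exact ih h1
    · rw [PySem.Set.add_of_not_mem hm, List.pairwise_append]
      refine ⟨ih h1, List.pairwise_singleton _ _, ?_⟩
      intro a ha b hb
      rw [List.mem_singleton] at hb
      rw [hb]
      have ham : a ∈ m' := (PySem.Set.mem_ofList _ _).mp ha
      have hne : a ≠ y := fun hay => hm (hay ▸ ha)
      exact lt_of_le_of_ne (h3 a ham y (List.mem_singleton_self y)) hne
  
-- in a ≤-sorted list, an upper bound that occurs in the list is the LAST distinct element
theorem pvOfList_concat_last (m : List String) (x : String) (hpw : m.Pairwise (· ≤ ·))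
    (hx : x ∈ m) (hub : ∀ a ∈ m, a ≤ x) : ∃ s, PySem.Set.ofList m = s ++ [x] := by
  induction m using List.reverseRecOn with
  | nil => cases hx
  | append_singleton m' y ih =>
    rw [List.pairwise_append] at hpw
    obtain ⟨h1, _, h3⟩ := hpw
    rw [PySem.Set.ofList_append_singleton]
    by_cases hxy : y = x
    · subst hxy
      by_cases hm : y ∈ PySem.Set.ofList m'
      · rw [PySem.Set.add_of_mem hm]
        exact ih h1 ((PySem.Set.mem_ofList _ _).mp hm)
          (fun a ha => h3 a ha y (List.mem_singleton_self y))
      · rw [PySem.Set.add_of_not_mem hm]; exact ⟨_, rfl⟩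
    · exfalso
      have hx' : x ∈ m' := by
        rcases List.mem_append.mp hx with h | h
        · exact h
        · exact absurd (List.mem_singleton.mp h).symm hxy
      exact hxy (le_antisymm (hub y (by simp)) (h3 x hx' y (List.mem_singleton_self y)))

-- B's grouping loop over a date-sorted list produces exactly the grouped view pvG
theorem pvGroups_eq (l : List (List (String × String)))
    (h : (l.map pvDate).Pairwise (· ≤ ·)) :
    (l.foldl pvGroupStep []).reverse = pvG l := by
  induction l using List.reverseRecOn with
  | nil => simp [pvG, PySem.Set.ofList]
  | append_singleton t e ih =>
    rw [List.map_append, List.pairwise_append] at h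
    obtain ⟨hpw, _, hub'⟩ := h
    have hub : ∀ a ∈ t.map pvDate, a ≤ pvDate e := by
      intro a ha; exact hub' a ha (pvDate e) (by simp)
    have hfold : t.foldl pvGroupStep [] = (pvG t).reverse := by
      rw [← ih hpw, List.reverse_reverse]
    rw [List.foldl_append, List.foldl_cons, List.foldl_nil, hfold]
    by_cases hmem : pvDate e ∈ t.map pvDate
    · -- the new entry's date is the date of the last group
      obtain ⟨s, hs⟩ := pvOfList_concat_last _ _ hpw hmem hub
      have hnd : (s ++ [pvDate e]).Nodup := hs ▸ PySem.Set.nodup_ofList _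
      have hxns : pvDate e ∉ s := by
        simp only [List.nodup_append, List.nodup_cons, List.not_mem_nil, List.nodup_nil] at hnd
        tauto
      have hG : pvG t = s.map (fun d => (d, pvRolesOf t d)) ++ [(pvDate e, pvRolesOf t (pvDate e))] := by
        rw [pvG, hs, List.map_append]; rfl
      rw [hG, List.reverse_append, List.reverse_singleton, List.singleton_append]
      show (pvGroupStep ((pvDate e, pvRolesOf t (pvDate e)) :: (s.map _).reverse) e).reverse = _
      rw [pvGroupStep, if_pos (show pvDate e = pvEntryGet e "date" from rfl)]
      rw [List.reverse_cons, List.reverse_reverse]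
      have hS' : PySem.Set.ofList ((t ++ [e]).map pvDate) = s ++ [pvDate e] := by
        rw [show (t ++ [e]).map pvDate = t.map pvDate ++ [pvDate e] by simp,
            PySem.Set.ofList_append_singleton,
            PySem.Set.add_of_mem (by rw [PySem.Set.mem_ofList _ _]; simpa using hmem), hs]
      rw [pvG, hS', List.map_append]
      congr 1
      · exact (List.map_congr_left fun d hd => by
          have : pvDate e ≠ d := fun hc => hxns (hc ▸ hd)
          rw [pvRolesOf_append_ne t e d this]).symm
      · simp only [List.map_cons, List.map_nil]
        rw [pvRolesOf_append_self]
        rfl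
    · -- a fresh date: a new group is opened at the end
      have hS' : PySem.Set.ofList ((t ++ [e]).map pvDate)
          = PySem.Set.ofList (t.map pvDate) ++ [pvDate e] := by
        rw [show (t ++ [e]).map pvDate = t.map pvDate ++ [pvDate e] by simp,
            PySem.Set.ofList_append_singleton,
            PySem.Set.add_of_not_mem (by rw [PySem.Set.mem_ofList _ _]; exact hmem)]
      have hmapeq : (PySem.Set.ofList (t.map pvDate)).map (fun d => (d, pvRolesOf (t ++ [e]) d))
          = (PySem.Set.ofList (t.map pvDate)).map (fun d => (d, pvRolesOf t d)) := by
        refine List.map_congr_left fun d hd => ?_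
        have hdm : d ∈ t.map pvDate := (PySem.Set.mem_ofList _ _).mp hd
        have : pvDate e ≠ d := fun hc => hmem (hc ▸ hdm)
        rw [pvRolesOf_append_ne t e d this]
      have hrolese : pvRolesOf (t ++ [e]) (pvDate e) = PySem.Set.ofList [pvRole e] := by
        rw [pvRolesOf_append_self, pvRolesOf_of_not_mem t _ hmem]
        rfl
      have htarget : pvG (t ++ [e]) = pvG t ++ [(pvDate e, PySem.Set.ofList [pvRole e])] := by
        rw [pvG, hS', List.map_append, pvG, hmapeq]
        simp only [List.map_cons, List.map_nil, hrolese]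
      rw [htarget]
      rcases List.eq_nil_or_concat (PySem.Set.ofList (t.map pvDate)) with hnil | ⟨s, x0, hs⟩
      · have ht : pvG t = [] := by rw [pvG, hnil]; rfl
        rw [ht]
        rfl
      · have hx0 : x0 ∈ t.map pvDate := by
          rw [show (x0 ∈ t.map pvDate) ↔ x0 ∈ PySem.Set.ofList (t.map pvDate) from (PySem.Set.mem_ofList _ _).symm, hs, List.concat_eq_append]; simp
        have hx0ne : x0 ≠ pvDate e := fun hc => hmem (hc ▸ hx0)
        have hG : pvG t = s.map (fun d => (d, pvRolesOf t d)) ++ [(x0, pvRolesOf t x0)] := by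
          rw [pvG, hs, List.concat_eq_append, List.map_append]; rfl
        rw [hG, List.reverse_append, List.reverse_singleton, List.singleton_append]
        show (pvGroupStep ((x0, pvRolesOf t x0) :: (s.map _).reverse) e).reverse = _
        rw [pvGroupStep, if_neg (show ¬ (x0 = pvEntryGet e "date") from hx0ne)]
        simp [List.reverse_cons]
        exact ⟨rfl, rfl⟩

-- two permuted entry lists give the same sorted role list for every day
theorem pvSortedRoles_perm (l₁ l₂ : List (List (String × String))) (h : l₁.Perm l₂) (d : String) :
    PySem.List.sorted (pvRolesOf l₁ d) (fun x => x) = PySem.List.sorted (pvRolesOf l₂ d) (fun x => x) := by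
  apply PySem.List.sorted_eq_sorted_of_perm _ _ _ (fun a b hab => hab)
  unfold pvRolesOf
  have hp : ((l₁.filter (fun e => pvDate e == d)).map pvRole).Perm
      ((l₂.filter (fun e => pvDate e == d)).map pvRole) := ((h.filter _).map _)
  rw [List.perm_ext_iff_of_nodup (PySem.Set.nodup_ofList _) (PySem.Set.nodup_ofList _)]
  intro x
  rw [PySem.Set.mem_ofList _ _, PySem.Set.mem_ofList _ _, hp.mem_iff]

-- xs[:b] commutes with map
theorem pvSliceMap {α β : Type} (f : α → β) (xs : List α) (b : Int) :
    PySem.List.slice (xs.map f) none (some b) = (PySem.List.slice xs none (some b)).map f := by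
  simp [PySem.List.slice, PySem.List.clampIdx, List.map_take]

-- A's sorted distinct dates are exactly the distinct dates of the date-sorted entry list
theorem pvSortedDates_eq (l : List (List (String × String))) :
    PySem.List.sorted (PySem.Set.ofList (l.map pvDate)) (fun x => x)
      = PySem.Set.ofList ((PySem.List.sorted l (fun e => pvDate e)).map pvDate) := by
  apply PySem.List.sorted_eq_of_perm_of_pairwise_lt
  · rw [List.perm_ext_iff_of_nodup (PySem.Set.nodup_ofList _) (PySem.Set.nodup_ofList _)]
    intro x
    rw [PySem.Set.mem_ofList _ _, PySem.Set.mem_ofList _ _,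
        ((PySem.List.sorted_perm l (fun e => pvDate e) false).map pvDate).mem_iff]
  · exact pvOfList_pairwise_lt _ (PySem.List.sorted_map_key_pairwise l (fun e => pvDate e))

-- ===== VERDICT (by name: the statement is the Claim_ definition above) =====
set_option maxHeartbeats 1000000 in
theorem summarise_forward_staffing_py_spec : Claim_equal_summarise_forward_staffing_py := by
  intro schedule horizon _ _
  show summarise_forward_staffing_py schedule horizon = summarise_forward_staffing_py_alt schedule horizon
  simp only [summarise_forward_staffing_py, summarise_forward_staffing_py_alt]
  set E := PySem.Dict.getD (PySem.Dict.mk schedule) "staff_schedule" ([] : List (List (String × String))) with hE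
  by_cases h0 : E = []
  · rw [if_pos h0, if_pos h0]
  · rw [if_neg h0, if_neg h0]
    congr 1
    rw [PySem.List.foldl_append_singleton_eq_map]
    congr 1
    set ordered := PySem.List.sorted E (fun e => pvEntryGet e "date") with hord
    have hordered : ordered = PySem.List.sorted E (fun e => pvDate e) := rfl
    have hperm : ordered.Perm E := hordered ▸ PySem.List.sorted_perm E (fun e => pvDate e) false
    have hkeys : (E.foldl pvCountStep PySem.Dict.empty).keys = PySem.Set.ofList (E.map pvDate) :=
      pvKeysA E
    have hgroups : (ordered.foldl pvGroupStep []).reverse = pvG ordered := by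
      rw [hordered]
      exact pvGroups_eq _ (PySem.List.sorted_map_key_pairwise E (fun e => pvDate e))
    rw [hkeys, hgroups, pvSortedDates_eq E, pvG, ← hordered, pvSliceMap, List.map_map]
    refine List.map_congr_left fun d _ => ?_
    show pvLineA E d = pvLineB (d, pvRolesOf ordered d)
    rw [pvLineA, pvLineB]
    have : PySem.Set.ofList ((E.filter (fun e => pvEntryGet e "date" == d)).map
        (fun e => pvEntryGet e "role")) = pvRolesOf E d := rfl
    rw [this]
    rw [pvSortedRoles_perm E ordered hperm.symm d]
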